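-- pv_equiv track=rewrite | github.com/IMaeots/Python-Taltech-course | EX/ex03_loops/control_number.py | control_number
-- ===== SOURCE A (Python) =====
-- def control_number(encrypted_string: str) -> bool:
--     """
--     Given encrypted string that has a control number in the end of it, return True if correct, else False.
--
--     Calculating the correct control number:
--     1. Start the calculation from 0.
--     2. Add 1 for every lowercase occurrence.
--     3. Add 2 for every uppercase occurrence.
--     4. Add 5 for any of the following symbol occurrences: "?!@#".
--     Other symbols/letters/digits don't affect the result.
--
--     NB! If for example the number you come up with is 25, you only have to check the last two digits of the string.
--     e.g. control_number("?!?!#4525") -> True, because it ends with 25.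
--
--     :param encrypted_string: encrypted string
--     :return: validation
--     """
--     encryption_number = 0
--
--     for i in encrypted_string:
--         if i.islower():
--             encryption_number += 1
--         elif i.isupper():
--             encryption_number += 2
--         elif i in "!?@#":
--             encryption_number += 5
--
--     return encrypted_string.endswith(str(encryption_number))
-- ===== SOURCE B (Python) =====
-- def control_number(encrypted_string: str) -> bool:
--     """Staged-passes variant: three separate class counts combined by a weighted formula."""
--     chars = list(encrypted_string)
--     lower = len([ch for ch in chars if ch.islower()])
--     upper = len([ch for ch in chars if ch.isupper()])
--     symbols = len([ch for ch in chars if ch in "!?@#"])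
--     return encrypted_string.endswith(str(lower + 2 * upper + 5 * symbols))
-- ===== Notes on version B (the rewrite author's own statement) =====
-- stated objective: alternative
-- what changed: B replaces A's single accumulating loop with three separate filter passes (lowercase, uppercase, symbol counts) combined by the closed weighted formula lower + 2*upper + 5*symbols.
import Mathlib
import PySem

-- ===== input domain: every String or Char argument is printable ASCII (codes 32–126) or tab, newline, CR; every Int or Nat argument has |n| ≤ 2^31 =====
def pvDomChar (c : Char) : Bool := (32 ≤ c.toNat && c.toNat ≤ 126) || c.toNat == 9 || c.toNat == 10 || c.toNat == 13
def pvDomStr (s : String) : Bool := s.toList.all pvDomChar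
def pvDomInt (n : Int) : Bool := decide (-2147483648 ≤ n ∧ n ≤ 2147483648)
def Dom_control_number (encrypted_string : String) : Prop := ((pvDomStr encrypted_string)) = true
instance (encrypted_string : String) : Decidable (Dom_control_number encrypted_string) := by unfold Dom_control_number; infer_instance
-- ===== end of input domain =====

-- B replaces A's single accumulating loop with three filter passes combined by a weighted formula (alternative, same cost).

-- ===== PORT A =====
def control_number (encrypted_string : String) : Bool :=
  let encryption_number : Int := encrypted_string.toList.foldl
    (fun acc i =>
      if PySem.Chars.islower i then acc + 1
      else if PySem.Chars.isupper i then acc + 2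
      else if PySem.Str.isIn (String.ofList [i]) "!?@#" then acc + 5
      else acc) 0
  PySem.Str.endswith encrypted_string (PySem.Int.toStr encryption_number)

-- ===== PORT B =====
def control_number_alt (encrypted_string : String) : Bool :=
  let chars := encrypted_string.toList
  let lower : Int := ((chars.filter PySem.Chars.islower).length : Int)
  let upper : Int := ((chars.filter PySem.Chars.isupper).length : Int)
  let symbols : Int := ((chars.filter
      (fun ch => PySem.Str.isIn (String.ofList [ch]) "!?@#")).length : Int)
  PySem.Str.endswith encrypted_string (PySem.Int.toStr (lower + 2 * upper + 5 * symbols))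

-- ===== PRECONDITION & SPEC =====
def Spec_control_number (encrypted_string : String) (out : Bool) : Prop := out = control_number_alt encrypted_string
instance (encrypted_string : String) (out : Bool) : Decidable (Spec_control_number encrypted_string out) := by unfold Spec_control_number; infer_instance

-- ===== CLAIM (what is proved, stated in full; the proofs are below) =====
def Claim_equal_control_number : Prop := ∀ (encrypted_string : String), Dom_control_number encrypted_string → Spec_control_number encrypted_string (control_number encrypted_string)

-- ===== LEMMAS AND PROOFS =====

-- the symbol test on a single character is membership in the four symbol characters
lemma pv_sym_iff (c : Char) :
    PySem.Str.isIn (String.ofList [c]) "!?@#" = true ↔ (c = '!' ∨ c = '?' ∨ c = '@' ∨ c = '#') := by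
  rw [PySem.Str.isIn_iff_infix]
  have h : (String.ofList [c]).toList = [c] := by simp
  rw [h, List.singleton_infix_iff]
  constructor
  · intro hm
    have : ("!?@#".toList) = ['!', '?', '@', '#'] := by decide
    rw [this] at hm
    simpa using hm
  · rintro (rfl | rfl | rfl | rfl) <;> decide

lemma pv_lower_not_upper (c : Char) (h : PySem.Chars.islower c = true) :
    PySem.Chars.isupper c = false := by
  simp [PySem.Chars.islower, PySem.Chars.isupper, Char.le_def, UInt32.le_iff_toNat_le] at *
  omega

lemma pv_lower_not_sym (c : Char) (h : PySem.Chars.islower c = true) :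
    PySem.Str.isIn (String.ofList [c]) "!?@#" = false := by
  by_contra hne
  have hs := (pv_sym_iff c).1 (by revert hne; cases PySem.Str.isIn (String.ofList [c]) "!?@#" <;> simp)
  rcases hs with rfl | rfl | rfl | rfl <;> revert h <;> decide

lemma pv_upper_not_sym (c : Char) (h : PySem.Chars.isupper c = true) :
    PySem.Str.isIn (String.ofList [c]) "!?@#" = false := by
  by_contra hne
  have hs := (pv_sym_iff c).1 (by revert hne; cases PySem.Str.isIn (String.ofList [c]) "!?@#" <;> simp)
  rcases hs with rfl | rfl | rfl | rfl <;> revert h <;> decide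

-- A's loop total equals B's weighted class counts
lemma pv_loop_eq (xs : List Char) (a : Int) :
    xs.foldl (fun acc i =>
      if PySem.Chars.islower i then acc + 1
      else if PySem.Chars.isupper i then acc + 2
      else if PySem.Str.isIn (String.ofList [i]) "!?@#" then acc + 5
      else acc) a
    = a + ((xs.filter PySem.Chars.islower).length : Int)
        + 2 * ((xs.filter PySem.Chars.isupper).length : Int)
        + 5 * ((xs.filter (fun ch => PySem.Str.isIn (String.ofList [ch]) "!?@#")).length : Int) := by
  induction xs generalizing a with
  | nil => simp
  | cons x t ih =>
    simp only [List.foldl_cons, List.filter_cons]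
    by_cases hl : PySem.Chars.islower x = true
    · rw [if_pos hl]
      simp only [hl, pv_lower_not_upper x hl, pv_lower_not_sym x hl, ih]
      push_cast [List.length_cons]
      ring
    · rw [if_neg hl]
      by_cases hu : PySem.Chars.isupper x = true
      · rw [if_pos hu]
        simp only [hu, eq_false_of_ne_true hl, pv_upper_not_sym x hu, ih]
        push_cast [List.length_cons]
        ring
      · rw [if_neg hu]
        by_cases hs : PySem.Str.isIn (String.ofList [x]) "!?@#" = true
        · rw [if_pos hs]
          simp only [hs, eq_false_of_ne_true hl, eq_false_of_ne_true hu, ih]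
          push_cast [List.length_cons]
          ring
        · rw [if_neg hs]
          simp only [eq_false_of_ne_true hl, eq_false_of_ne_true hu, eq_false_of_ne_true hs, ih]
          simp

-- ===== VERDICT (by name: the statement is the Claim_ definition above) =====
theorem control_number_spec : Claim_equal_control_number := by
  intro s _
  unfold Spec_control_number
  simp only [control_number, control_number_alt, pv_loop_eq]
  norm_num
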